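-- pv_equiv track=rewrite | github.com/xiaobingling93-pixel/Ascend-msit | msit/test/UT/benchmark_ut/test_args.py | cmd_dict_to_list
-- ===== SOURCE A (Python) =====
-- def cmd_dict_to_list(cmd_dict, new_args={}):
--     cmd_list = []
--     for key, value in cmd_dict.items():
--         cmd_list.append(key)
--         cmd_list.append(new_args.pop(key, value))
--
--     for key, value in new_args.items():
--         cmd_list.append(key)
--         cmd_list.append(value)
--     return cmd_list
-- ===== SOURCE B (Python) =====
-- def cmd_dict_to_list(cmd_dict, new_args={}):
--     # Return-value equivalent to A: dict merge keeps cmd_dict's key order,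
--     # overrides shared values, then appends new_args-only keys in order.
--     # (Unlike A, B does not mutate new_args.)
--     merged = {**cmd_dict, **new_args}
--     return [x for kv in merged.items() for x in kv]
-- ===== Notes on version B (the rewrite author's own statement) =====
-- stated objective: simpler
-- what changed: B replaces A's two append loops with pop-mutation of new_args by a single dict merge {**cmd_dict, **new_args} followed by one flattening comprehension over the merged items; B does not mutate new_args (return values are identical).
import Mathlib
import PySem

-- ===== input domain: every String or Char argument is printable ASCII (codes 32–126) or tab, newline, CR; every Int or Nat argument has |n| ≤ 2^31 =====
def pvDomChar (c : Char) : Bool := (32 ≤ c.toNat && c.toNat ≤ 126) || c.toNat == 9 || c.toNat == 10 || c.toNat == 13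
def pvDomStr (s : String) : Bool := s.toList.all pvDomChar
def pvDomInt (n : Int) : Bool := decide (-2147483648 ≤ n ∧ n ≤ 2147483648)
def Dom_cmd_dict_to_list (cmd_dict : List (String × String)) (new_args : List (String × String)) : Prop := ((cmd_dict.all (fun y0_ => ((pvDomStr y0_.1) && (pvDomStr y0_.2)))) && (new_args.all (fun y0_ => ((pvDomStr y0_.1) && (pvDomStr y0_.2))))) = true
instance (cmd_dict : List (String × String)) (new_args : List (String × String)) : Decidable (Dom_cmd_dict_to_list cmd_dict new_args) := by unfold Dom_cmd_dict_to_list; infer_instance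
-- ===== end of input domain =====

-- B replaces A's two append loops (which pop overrides out of new_args) by one dict
-- merge {**cmd_dict, **new_args} followed by a single flattening pass — simpler.
-- Equivalence is about the RETURN value only: A pops shared keys out of new_args
-- (caller-observable mutation), B leaves new_args untouched.

-- ===== PORT A =====
-- dict parameters are modelled as PySem.Dict built from the association lists
def cmd_dict_to_list (cmd_dict : List (String × String)) (new_args : List (String × String)) : List String :=
  let st := (PySem.Dict.ofList cmd_dict).items.foldl
    (fun (st : List String × PySem.Dict String String) kv =>
      match st.2.pop? kv.1 with                      -- new_args.pop(key, value)
      | some (v, d') => (st.1 ++ [kv.1] ++ [v], d')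
      | none => (st.1 ++ [kv.1] ++ [kv.2], st.2))
    ([], PySem.Dict.ofList new_args)
  st.2.items.foldl (fun l kv => l ++ [kv.1] ++ [kv.2]) st.1

-- ===== PORT B =====
def cmd_dict_to_list_alt (cmd_dict : List (String × String)) (new_args : List (String × String)) : List String :=
  let merged := (PySem.Dict.ofList cmd_dict).update (PySem.Dict.ofList new_args).items  -- {**cmd_dict, **new_args}
  merged.items.flatMap (fun kv => [kv.1, kv.2])

-- ===== PRECONDITION & SPEC =====
def Spec_cmd_dict_to_list (cmd_dict : List (String × String)) (new_args : List (String × String)) (out : List String) : Prop := out = cmd_dict_to_list_alt cmd_dict new_args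
instance (cmd_dict : List (String × String)) (new_args : List (String × String)) (out : List String) : Decidable (Spec_cmd_dict_to_list cmd_dict new_args out) := by unfold Spec_cmd_dict_to_list; infer_instance

-- ===== CLAIM (what is proved, stated in full; the proofs are below) =====
def Claim_equal_cmd_dict_to_list : Prop := ∀ (cmd_dict : List (String × String)) (new_args : List (String × String)), Dom_cmd_dict_to_list cmd_dict new_args → Spec_cmd_dict_to_list cmd_dict new_args (cmd_dict_to_list cmd_dict new_args)

-- ===== LEMMAS AND PROOFS =====

theorem pvBeqComm (a b : String) : (a == b) = (b == a) := by
  by_cases h : a = b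
  · simp [h]
  · simp [h, Ne.symm h]

-- lookup is unchanged by erasing a different key
theorem pvGetErase (na : PySem.Dict String String) (k k' : String) (h : (k' == k) = false) :
    (na.erase k).get? k' = na.get? k' := by
  simp only [PySem.Dict.erase, PySem.Dict.get?]
  congr 1
  induction na.items with
  | nil => rfl
  | cons q rest ih =>
    rw [List.filter_cons]
    by_cases hq : (q.1 == k) = true
    · have hk : q.1 = k := by simpa using hq
      have hqk' : ¬ ((q.1 == k') = true) := by
        subst hk; rw [pvBeqComm]; simp [h]
      rw [if_neg (by simp [hq]), List.find?_cons_of_neg (p := fun r : String × String => r.1 == k') hqk', ih]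
    · by_cases hq' : (q.1 == k') = true
      · rw [if_pos (by simp [hq]), List.find?_cons_of_pos (p := fun r : String × String => r.1 == k') hq', List.find?_cons_of_pos (p := fun r : String × String => r.1 == k') hq']
      · rw [if_pos (by simp [hq]), List.find?_cons_of_neg (p := fun r : String × String => r.1 == k') hq', List.find?_cons_of_neg (p := fun r : String × String => r.1 == k') hq', ih]

-- A's first loop: each step appends [key, lookup-or-default] and erases the key
theorem pvLoopA (L : List (String × String)) (na : PySem.Dict String String) (acc : List String)
    (hL : (L.map Prod.fst).Nodup) :
    L.foldl (fun (st : List String × PySem.Dict String String) kv =>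
        match st.2.pop? kv.1 with
        | some (v, d') => (st.1 ++ [kv.1] ++ [v], d')
        | none => (st.1 ++ [kv.1] ++ [kv.2], st.2)) (acc, na)
    = (acc ++ L.flatMap (fun p => [p.1, na.getD p.1 p.2]),
       PySem.Dict.mk (na.items.filter (fun q => !(L.any (fun p => q.1 == p.1))))) := by
  induction L generalizing na acc with
  | nil => simp
  | cons p rest ih =>
    have hrestk : ∀ q ∈ rest, ¬ p.1 = q.1 := by
      intro q hq hpq
      have := hL
      simp only [List.map_cons, List.nodup_cons] at this
      exact this.1 (hpq ▸ List.mem_map_of_mem hq)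
    have hLt : (rest.map Prod.fst).Nodup := by
      simpa using hL.of_cons
    -- one step of the loop
    have hstep : ∀ r : Option String, na.get? p.1 = r →
        (match na.pop? p.1 with
          | some (v, d') => (acc ++ [p.1] ++ [v], d')
          | none => (acc ++ [p.1] ++ [p.2], na))
        = (acc ++ [p.1] ++ [na.getD p.1 p.2], na.erase p.1) := by
      intro r hr
      cases r with
      | some v0 =>
        simp [PySem.Dict.pop?, hr, PySem.Dict.getD]
      | none =>
        have hfind : na.items.find? (fun r => r.1 == p.1) = none := by
          have h0 := hr
          simp only [PySem.Dict.get?, Option.map_eq_none_iff] at h0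
          exact h0
        have hid : na.items.filter (fun q => !(q.1 == p.1)) = na.items := by
          apply List.filter_eq_self.2
          intro q hq
          have := List.find?_eq_none.1 hfind q hq
          simpa using this
        simp [PySem.Dict.pop?, hr, PySem.Dict.getD, PySem.Dict.erase, hid]
    rw [List.foldl_cons]
    simp only [hstep (na.get? p.1) rfl]
    rw [ih (na.erase p.1) _ hLt]
    rw [Prod.mk.injEq]
    refine ⟨?_, ?_⟩
    · -- list component
      rw [List.flatMap_cons]
      have : rest.flatMap (fun q => [q.1, (na.erase p.1).getD q.1 q.2])
           = rest.flatMap (fun q => [q.1, na.getD q.1 q.2]) := by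
        apply List.flatMap_congr
        intro q hq
        have h1 : (q.1 == p.1) = false := by
          simp [Ne.symm (hrestk q hq)]
        rw [PySem.Dict.getD, PySem.Dict.getD, pvGetErase na p.1 q.1 h1]
      rw [this]
      simp
    · -- dict component
      show PySem.Dict.mk _ = PySem.Dict.mk _
      congr 1
      show ((na.erase p.1).items.filter _) = _
      simp only [PySem.Dict.erase]
      rw [List.filter_filter]
      apply List.filter_congr
      intro q _
      simp [List.any_cons, Bool.not_or, Bool.and_comm]

-- B's merge: items of d updated with a dict's items, pointwise
theorem pvUpdateItems (ps : List (String × String)) (d : PySem.Dict String String)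
    (hps : (ps.map Prod.fst).Nodup) :
    (d.update ps).items
    = d.items.map (fun p => (p.1, ((PySem.Dict.mk ps).get? p.1).getD p.2))
      ++ ps.filter (fun r => !(d.contains r.1)) := by
  induction ps generalizing d with
  | nil =>
    simp [PySem.Dict.update, PySem.Dict.get?]
  | cons q rest ih =>
    obtain ⟨qk, qv⟩ := q
    have hq_not_rest : ∀ r ∈ rest, ¬ qk = r.1 := by
      intro r hr hqr
      have h0 := hps
      simp only [List.map_cons, List.nodup_cons] at h0
      exact h0.1 (hqr ▸ List.mem_map_of_mem hr)
    have hrt : (rest.map Prod.fst).Nodup := by simpa using hps.of_cons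
    have hq_rest_none : (PySem.Dict.mk rest).get? qk = none := by
      simp only [PySem.Dict.get?, Option.map_eq_none_iff]
      apply List.find?_eq_none.2
      intro r hr
      simp [Ne.symm (hq_not_rest r hr)]
    show ((d.insert qk qv).update rest).items = _
    rw [ih (d.insert qk qv) hrt]
    have hfilt : rest.filter (fun r => !((d.insert qk qv).contains r.1))
        = rest.filter (fun r => !(d.contains r.1)) := by
      apply List.filter_congr
      intro r hr
      rw [PySem.Dict.contains_insert]
      simp [Ne.symm (hq_not_rest r hr)]
    by_cases hc : d.contains qk = true
    · rw [PySem.Dict.items_insert_of_contains d qv hc]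
      rw [List.map_map]
      have hmap : ∀ p ∈ d.items,
          ((fun p => (p.1, ((PySem.Dict.mk rest).get? p.1).getD p.2)) ∘
            (fun p => if (p.1 == qk) = true then (qk, qv) else p)) p
          = (p.1, ((PySem.Dict.mk ((qk, qv) :: rest)).get? p.1).getD p.2) := by
        intro p _
        by_cases hpq : (p.1 == qk) = true
        · have hk : p.1 = qk := by simpa using hpq
          simp [hk, PySem.Dict.get?_mk_cons, hq_rest_none]
        · have hne : ¬ p.1 = qk := by simpa using hpq
          have hne' : ¬ qk = p.1 := fun h => hne h.symm
          simp [hne, hne', PySem.Dict.get?_mk_cons]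
      rw [List.map_congr_left hmap]
      rw [hfilt, List.filter_cons]
      simp [hc]
    · have hc' : d.contains qk = false := by simpa using hc
      rw [PySem.Dict.items_insert_of_not_contains d qv hc']
      rw [List.map_append]
      have hnone : ∀ p ∈ d.items, (p.1 == qk) = false := by
        intro p hp
        have h0 := hc'
        simp only [PySem.Dict.contains, List.any_eq_false] at h0
        simpa using h0 p hp
      have hmap : d.items.map (fun p => (p.1, ((PySem.Dict.mk rest).get? p.1).getD p.2))
          = d.items.map (fun p => (p.1, ((PySem.Dict.mk ((qk, qv) :: rest)).get? p.1).getD p.2)) := by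
        apply List.map_congr_left
        intro p hp
        have h2 : (qk == p.1) = false := by rw [pvBeqComm]; exact hnone p hp
        simp [PySem.Dict.get?_mk_cons, h2]
      rw [hmap, hfilt, List.filter_cons]
      simp [hc', List.map_cons, PySem.Dict.get?_mk_cons, hq_rest_none]

-- ===== VERDICT (by name: the statement is the Claim_ definition above) =====
theorem cmd_dict_to_list_spec : Claim_equal_cmd_dict_to_list := by
  unfold Claim_equal_cmd_dict_to_list
  intro cmd_dict new_args _
  show cmd_dict_to_list cmd_dict new_args = cmd_dict_to_list_alt cmd_dict new_args
  simp only [cmd_dict_to_list, cmd_dict_to_list_alt]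
  set C := PySem.Dict.ofList cmd_dict with hC
  set N := PySem.Dict.ofList new_args with hN
  have hCk : (C.items.map Prod.fst).Nodup := PySem.Dict.nodup_keys_ofList cmd_dict
  have hNk : (N.items.map Prod.fst).Nodup := PySem.Dict.nodup_keys_ofList new_args
  rw [pvLoopA C.items N [] hCk]
  have hfa : (fun (l : List String) (kv : String × String) => l ++ [kv.1] ++ [kv.2])
      = fun (l : List String) (kv : String × String) => l ++ ([kv.1] ++ [kv.2]) := by
    funext l kv
    rw [List.append_assoc]
  rw [hfa, PySem.List.foldl_append_eq_flatMap]
  have hmk : PySem.Dict.mk N.items = N := rfl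
  rw [pvUpdateItems N.items C hNk, hmk]
  rw [List.flatMap_append, List.flatMap_map]
  simp only [List.nil_append, List.singleton_append]
  congr 1
  congr 1
  apply List.filter_congr
  intro r _
  simp only [PySem.Dict.contains]
  congr 1
  induction C.items with
  | nil => rfl
  | cons p rest ih => simp [List.any_cons, ih, pvBeqComm]
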